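-- pv_equiv track=rewrite | github.com/hersheleh/algorithms | python/problems/smallest_number_not_in_array.py | smallest_int_not_in_array_dict
-- ===== SOURCE A (Python) =====
-- def smallest_int_not_in_array_dict(A):
--     """Find the smallest int not in array using a dict."""
--     A_dict = {}
--     largest_int = 1
--     for i in A:                 # O(n)
--         if (i > largest_int):
--             largest_int = i
--         A_dict[i] = i           # O(n)
--
--     for i in range(1, largest_int):
--         if A_dict.get(i) is None:
--             return i
-- ===== SOURCE B (Python) =====
-- def smallest_int_not_in_array_dict(A):
--     """Smallest positive int strictly below max(A) that is missing from A, else None."""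
--     expected = 1
--     for x in sorted(set(A)):
--         if x == expected:
--             expected += 1
--         elif x > expected:
--             break
--     if A and expected < max(A):
--         return expected
--     return None
-- ===== Notes on version B (the rewrite author's own statement) =====
-- stated objective: alternative
-- what changed: Replaces the dict build plus linear probe over range(1, max) with sorting the distinct elements and a single left-to-right scan tracking the next expected positive integer.
import Mathlib
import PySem

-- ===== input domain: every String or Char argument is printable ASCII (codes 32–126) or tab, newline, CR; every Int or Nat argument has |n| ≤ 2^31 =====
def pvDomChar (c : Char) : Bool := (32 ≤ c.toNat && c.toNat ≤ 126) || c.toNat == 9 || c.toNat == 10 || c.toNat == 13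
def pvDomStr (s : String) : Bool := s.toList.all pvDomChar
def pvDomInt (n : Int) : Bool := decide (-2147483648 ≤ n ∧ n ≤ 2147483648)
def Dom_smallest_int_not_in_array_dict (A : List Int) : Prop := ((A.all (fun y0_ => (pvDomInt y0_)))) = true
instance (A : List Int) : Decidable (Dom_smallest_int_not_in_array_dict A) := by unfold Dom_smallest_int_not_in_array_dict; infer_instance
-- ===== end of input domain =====

-- B replaces A's dict + probe over range(1, max) with sorting the distinct elements and an expected-counter scan (alternative algorithm, same result).

-- ===== PORT A =====
def pvStepA (st : PySem.Dict Int Int × Int) (i : Int) : PySem.Dict Int Int × Int :=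
  (st.1.insert i i, if i > st.2 then i else st.2)

-- `for i in range(1, largest_int): if A_dict.get(i) is None: return i` — fuel-indexed loop (lazy, early return, like Python's range)
def pvLoopA (d : PySem.Dict Int Int) : Nat → Int → Option Int
  | 0, _ => none
  | n + 1, i => if (d.get? i).isNone then some i else pvLoopA d n (i + 1)

def smallest_int_not_in_array_dict (A : List Int) : Option Int :=
  let st := A.foldl pvStepA (PySem.Dict.empty, 1)
  pvLoopA st.1 (st.2 - 1).toNat 1

-- ===== PORT B =====
-- the `for x in sorted(set(A))` loop with `break`, as structural recursion on the sorted list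
def pvScanB : List Int → Int → Int
  | [], e => e
  | x :: xs, e => if x = e then pvScanB xs (e + 1) else if x > e then e else pvScanB xs e

def smallest_int_not_in_array_dict_alt (A : List Int) : Option Int :=
  let e := pvScanB (PySem.List.sorted (PySem.Set.ofList A) (fun y => y) false) 1
  -- `if A and expected < max(A): return expected` — max? is none exactly on the empty list
  match PySem.List.max? A (fun y => y) with
  | none => none
  | some m => if e < m then some e else none

-- ===== PRECONDITION & SPEC =====
def Spec_smallest_int_not_in_array_dict (A : List Int) (out : Option Int) : Prop := out = smallest_int_not_in_array_dict_alt A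
instance (A : List Int) (out : Option Int) : Decidable (Spec_smallest_int_not_in_array_dict A out) := by unfold Spec_smallest_int_not_in_array_dict; infer_instance

-- ===== CLAIM (what is proved, stated in full; the proofs are below) =====
def Claim_equal_smallest_int_not_in_array_dict : Prop := ∀ (A : List Int), Dom_smallest_int_not_in_array_dict A → Spec_smallest_int_not_in_array_dict A (smallest_int_not_in_array_dict A)

-- ===== LEMMAS AND PROOFS =====

-- A's dict after the loop is none exactly at the ints not in A
theorem pvFoldA_get (A : List Int) : ∀ (d : PySem.Dict Int Int) (L i : Int),
    ((A.foldl pvStepA (d, L)).1.get? i = none) ↔ (d.get? i = none ∧ i ∉ A) := by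
  induction A with
  | nil => intro d L i; simp
  | cons x t ih =>
    intro d L i
    simp only [List.foldl_cons, pvStepA]
    rw [ih]
    rw [PySem.Dict.get?_insert]
    by_cases hix : i = x <;> simp [hix]

-- A's running largest is a fold of max
theorem pvFoldA_max (A : List Int) : ∀ (d : PySem.Dict Int Int) (L : Int),
    (A.foldl pvStepA (d, L)).2 = A.foldl max L := by
  induction A with
  | nil => intro d L; rfl
  | cons x t ih =>
    intro d L
    simp only [List.foldl_cons, pvStepA]
    rw [ih]
    congr 1
    rcases lt_or_ge L x with h | h
    · simp [max_eq_right h.le, h]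
    · simp [max_eq_left h, not_lt.mpr h]

theorem pvFoldlMaxShift (l : List Int) : ∀ (a b : Int), l.foldl max (max a b) = max a (l.foldl max b) := by
  induction l with
  | nil => intro a b; rfl
  | cons c t ih =>
    intro a b
    simp only [List.foldl_cons]
    rw [max_assoc, ih]

-- the fuel loop is find? over range(a, a+n)
theorem pvLoopA_eq (d : PySem.Dict Int Int) : ∀ (n : Nat) (a : Int),
    pvLoopA d n a = (PySem.List.pyRange a (a + (n : Int)) 1).find? (fun i => (d.get? i).isNone) := by
  intro n
  induction n with
  | zero => intro a; rw [PySem.List.pyRange_one_eq_nil (by omega)]; rfl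
  | succ n ih =>
    intro a
    rw [PySem.List.pyRange_one_cons (by push_cast; omega)]
    by_cases hp : (d.get? a).isNone
    · rw [List.find?_cons_of_pos (p := fun i => (d.get? i).isNone) (by simpa using hp)]
      simp [pvLoopA, hp]
    · rw [List.find?_cons_of_neg (p := fun i => (d.get? i).isNone) (by simpa using hp)]
      have : a + ((n + 1 : Nat) : Int) = (a + 1) + (n : Int) := by push_cast; omega
      rw [this, ← ih (a + 1)]
      simp [pvLoopA, hp]

-- characterisation of find? over range(a, a+n)
theorem pvFindRange (p : Int → Bool) : ∀ (n : Nat) (a : Int),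
    (((PySem.List.pyRange a (a + (n : Int)) 1).find? p = none) → ∀ k, a ≤ k → k < a + (n : Int) → p k = false)
    ∧ (∀ i, (PySem.List.pyRange a (a + (n : Int)) 1).find? p = some i →
        a ≤ i ∧ i < a + (n : Int) ∧ p i = true ∧ ∀ k, a ≤ k → k < i → p k = false) := by
  intro n
  induction n with
  | zero =>
    intro a
    rw [PySem.List.pyRange_one_eq_nil (by omega)]
    constructor
    · intro _ k hk1 hk2; omega
    · intro i h; simp at h
  | succ n ih =>
    intro a
    rw [PySem.List.pyRange_one_cons (by push_cast; omega)]
    have hb : a + ((n + 1 : Nat) : Int) = (a + 1) + (n : Int) := by push_cast; omega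
    by_cases hp : p a
    · rw [List.find?_cons_of_pos hp]
      constructor
      · intro h; simp at h
      · intro i h
        have hia : i = a := by simpa using h.symm
        subst hia
        refine ⟨le_refl _, by push_cast; omega, hp, ?_⟩
        intro k hk1 hk2; omega
    · rw [List.find?_cons_of_neg (by simp [hp])]
      rw [hb]
      obtain ⟨h1, h2⟩ := ih (a + 1)
      constructor
      · intro h k hk1 hk2
        rcases eq_or_lt_of_le hk1 with rfl | hk
        · simpa using hp
        · exact h1 h k (by omega) hk2
      · intro i h
        obtain ⟨hi1, hi2, hi3, hi4⟩ := h2 i h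
        refine ⟨by omega, hi2, hi3, ?_⟩
        intro k hk1 hk2
        rcases eq_or_lt_of_le hk1 with rfl | hk
        · simpa using hp
        · exact hi4 k (by omega) hk2

-- the scan over a sorted list computes the least value ≥ e not in the list
theorem pvScanB_spec : ∀ (s : List Int), s.Pairwise (· ≤ ·) → ∀ (e : Int),
    e ≤ pvScanB s e ∧ pvScanB s e ∉ s ∧ ∀ k, e ≤ k → k < pvScanB s e → k ∈ s := by
  intro s
  induction s with
  | nil => intro _ e; refine ⟨le_refl _, by simp, ?_⟩; intro k h1 h2; exact absurd (lt_of_le_of_lt h1 h2) (lt_irrefl e)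
  | cons x xs ih =>
    intro hp e
    have hx : ∀ y ∈ xs, x ≤ y := List.pairwise_cons.mp hp |>.1
    have hxs := List.pairwise_cons.mp hp |>.2
    by_cases hxe : x = e
    · simp only [pvScanB, if_pos hxe]
      obtain ⟨h1, h2, h3⟩ := ih hxs (e + 1)
      refine ⟨by omega, ?_, ?_⟩
      · simp only [List.mem_cons, not_or]
        exact ⟨by omega, h2⟩
      · intro k hk1 hk2
        rcases eq_or_lt_of_le hk1 with rfl | hk
        · simp [hxe]
        · exact List.mem_cons_of_mem _ (h3 k (by omega) hk2)
    · by_cases hxg : x > e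
      · simp only [pvScanB, if_neg hxe, if_pos hxg]
        refine ⟨le_refl _, ?_, ?_⟩
        · simp only [List.mem_cons, not_or]
          refine ⟨by omega, fun hmem => ?_⟩
          have := hx e hmem; omega
        · intro k h1 h2; omega
      · simp only [pvScanB, if_neg hxe, if_neg hxg]
        obtain ⟨h1, h2, h3⟩ := ih hxs e
        refine ⟨h1, ?_, ?_⟩
        · simp only [List.mem_cons, not_or]
          exact ⟨by omega, h2⟩
        · intro k hk1 hk2
          exact List.mem_cons_of_mem _ (h3 k hk1 hk2)

-- ===== VERDICT (by name: the statement is the Claim_ definition above) =====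
theorem smallest_int_not_in_array_dict_spec : Claim_equal_smallest_int_not_in_array_dict := by
  intro A _
  unfold Spec_smallest_int_not_in_array_dict
  unfold smallest_int_not_in_array_dict smallest_int_not_in_array_dict_alt
  simp only []
  set M : Int := A.foldl max 1 with hMdef
  have hM2 : (A.foldl pvStepA (PySem.Dict.empty, 1)).2 = M := pvFoldA_max A _ 1
  have hM1 : 1 ≤ M := (PySem.List.le_foldl_max A 1).1
  -- scan side
  set s := PySem.List.sorted (PySem.Set.ofList A) (fun y => y) false with hs
  have hsp : s.Pairwise (· ≤ ·) := (PySem.List.sorted_pairwise (PySem.Set.ofList A) (fun y => y))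
  obtain ⟨he1, he2, he3⟩ := pvScanB_spec s hsp 1
  set e : Int := pvScanB s 1 with he
  have hmem : ∀ k : Int, k ∈ s ↔ k ∈ A := by
    intro k
    rw [hs, PySem.List.mem_sorted]
    exact PySem.Set.mem_ofList A k
  -- dict side
  have hget : ∀ i : Int, ((A.foldl pvStepA (PySem.Dict.empty, 1)).1.get? i = none) ↔ i ∉ A := by
    intro i
    rw [pvFoldA_get A PySem.Dict.empty 1 i]
    simp
  have hp : ∀ i : Int, ((fun i => ((A.foldl pvStepA (PySem.Dict.empty, 1)).1.get? i).isNone) i = true) ↔ i ∉ A := by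
    intro i
    rw [Option.isNone_iff_eq_none, hget]
  obtain ⟨hnone, hsome⟩ := pvFindRange (fun i => ((A.foldl pvStepA (PySem.Dict.empty, 1)).1.get? i).isNone) (M - 1).toNat 1
  rw [hM2, pvLoopA_eq]
  -- B's comparison bound: e < max(A) iff e < M (for nonempty A), since 1 ≤ e
  cases hA : A with
  | nil =>
    subst hA
    simp only [hMdef] at *
    rw [PySem.List.pyRange_one_eq_nil (by simp)]
    simp [PySem.List.max?]
  | cons x t =>
    rw [PySem.List.max?_id_cons]
    dsimp only
    have hm : M = max 1 (t.foldl max x) := by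
      rw [hMdef, hA]
      simp only [List.foldl_cons]
      have := pvFoldlMaxShift t 1 x
      rw [show List.foldl max (max 1 x) t = max 1 (List.foldl max x t) from this]
    set m : Int := t.foldl max x with hmdef
    have hEM : (e < m) ↔ (e < M) := by rw [hm]; omega
    rw [← hA] at *
    cases hfind : (PySem.List.pyRange 1 (1 + (((M - 1).toNat : Nat) : Int)) 1).find? (fun i => ((A.foldl pvStepA (PySem.Dict.empty, 1)).1.get? i).isNone) with
    | none =>
      have hall : ∀ k : Int, 1 ≤ k → k < M → k ∈ A := by
        intro k hk1 hk2
        have := hnone hfind k hk1 (by omega)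
        by_contra hkA
        rw [← Bool.not_eq_true, hp] at this
        exact this hkA
      have hne : ¬ e < M := fun hlt => he2 ((hmem e).mpr (hall e he1 hlt))
      rw [if_neg (fun h => hne (hEM.mp h))]
    | some i =>
      obtain ⟨hi1, hi2, hi3, hi4⟩ := hsome i hfind
      have hiA : i ∉ A := (hp i).mp hi3
      have hibelow : ∀ k : Int, 1 ≤ k → k < i → k ∈ A := by
        intro k hk1 hk2
        have := hi4 k hk1 hk2
        by_contra hkA
        rw [← Bool.not_eq_true, hp] at this
        exact this hkA
      have hei : e = i := by
        rcases lt_trichotomy e i with h | h | h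
        · exact absurd ((hmem e).mpr (hibelow e he1 h)) he2
        · exact h
        · exact absurd ((hmem i).mp (he3 i hi1 h)) hiA
      have hlt : e < M := by omega
      rw [if_pos (hEM.mpr hlt), hei]
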